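-- pv_equiv track=rewrite | github.com/dyvenia/viadot | viadot/tasks/customer_gauge.py | _drivers_cleaner
-- ===== SOURCE A (Python) =====
-- def _drivers_cleaner(
--
--     drivers: str = None
-- ) -> str:
--     """
--     Clean and format the 'drivers' data.
--
--     Args:
--         drivers (str, optional): Column name of the data to be cleaned. Defaults to None.
--
--     Returns:
--         str: A cleaned and formatted string of driver data.
--     """
--
--     drivers = drivers.split("}, {")
--     cleaned_drivers = []
--     for driver in drivers:
--         driver = driver.replace("{", "").replace("}", "")
--         driver = driver.replace("'", "").replace("label: ", "")
--         cleaned_drivers.append(driver)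
--     return ', '.join(cleaned_drivers)
-- ===== SOURCE B (Python) =====
-- def _drivers_cleaner(
--
--     drivers: str = None
-- ) -> str:
--     """Clean and format the 'drivers' data in one pass, with no split/loop/join.
--
--     Removing '{', '}', "'" and 'label: ' from the whole string directly is
--     equivalent to A's split-on-'}, {' / clean-each-piece / ', '-join, because
--     the delimiter '}, {' itself reduces to ', ' under those same removals.
--     """
--     return (
--         drivers.replace("{", "")
--         .replace("}", "")
--         .replace("'", "")
--         .replace("label: ", "")
--     )
-- ===== Notes on version B (the rewrite author's own statement) =====
-- stated objective: simpler
-- what changed: Replaced A's split-on-'}, {' loop with a per-piece cleaning list and a ', ' join by one flat chain of four replace calls on the whole string (no split, no loop, no accumulator, no join), which is equivalent because the delimiter '}, {' itself reduces to ', ' under the same removals.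
import Mathlib
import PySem

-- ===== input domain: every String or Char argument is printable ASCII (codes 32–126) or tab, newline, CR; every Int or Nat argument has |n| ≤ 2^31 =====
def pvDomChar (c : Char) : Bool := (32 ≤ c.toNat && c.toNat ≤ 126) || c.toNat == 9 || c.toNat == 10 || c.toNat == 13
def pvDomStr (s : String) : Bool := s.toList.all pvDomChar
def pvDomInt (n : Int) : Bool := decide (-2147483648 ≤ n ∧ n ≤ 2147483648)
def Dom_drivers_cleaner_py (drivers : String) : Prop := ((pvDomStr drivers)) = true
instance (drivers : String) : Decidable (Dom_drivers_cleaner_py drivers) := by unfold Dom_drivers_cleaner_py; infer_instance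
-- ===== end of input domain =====

-- B replaces A's split-on-"}, {" / clean-each-piece / ", "-join loop by one flat chain of the
-- same four replace calls on the whole string (simpler; same result, proved below).


-- ===== PORT A =====
-- drivers.split("}, {") with a nonempty literal separator never raises: PySem.Str.split? is
-- `some` here, and `.getD []` only discharges the impossible `none`.
def drivers_cleaner_py (drivers : String) : String :=
  let parts := (PySem.Str.split? drivers "}, {").getD []
  let cleaned_drivers := parts.foldl (fun acc driver =>
    let driver := PySem.Str.replace (PySem.Str.replace driver "{" "") "}" ""
    let driver := PySem.Str.replace (PySem.Str.replace driver "'" "") "label: " ""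
    acc ++ [driver]) []
  PySem.Str.join ", " cleaned_drivers

-- ===== PORT B =====
def drivers_cleaner_py_alt (drivers : String) : String :=
  PySem.Str.replace
    (PySem.Str.replace (PySem.Str.replace (PySem.Str.replace drivers "{" "") "}" "") "'" "")
    "label: " ""

-- ===== PRECONDITION & SPEC =====
def Spec_drivers_cleaner_py (drivers : String) (out : String) : Prop := out = drivers_cleaner_py_alt drivers
instance (drivers : String) (out : String) : Decidable (Spec_drivers_cleaner_py drivers out) := by unfold Spec_drivers_cleaner_py; infer_instance

-- ===== CLAIM (what is proved, stated in full; the proofs are below) =====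
def Claim_equal_drivers_cleaner_py : Prop := ∀ (drivers : String), Dom_drivers_cleaner_py drivers → Spec_drivers_cleaner_py drivers (drivers_cleaner_py drivers)

-- ===== LEMMAS AND PROOFS =====

-- `rep old new l` = Python's l.replace(old, new) for old ≠ [] (structural version of PySem.Chars.replace).
def rep (old new : List Char) : List Char → List Char
  | [] => []
  | c :: t =>
    if old.isPrefixOf (c :: t) ∧ old ≠ [] then new ++ rep old new (t.drop (old.length - 1))
    else c :: rep old new t
termination_by l => l.length
decreasing_by
  · simp only [List.length_drop, List.length_cons]; omega
  · simp

-- `sp sep l` = (first piece, later pieces) of l.split(sep) for sep ≠ [] (structural version of PySem.Chars.splitOn).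
def sp (sep : List Char) : List Char → List Char × List (List Char)
  | [] => ([], [])
  | c :: t =>
    if sep.isPrefixOf (c :: t) ∧ sep ≠ [] then
      ([], (sp sep (t.drop (sep.length - 1))).1 :: (sp sep (t.drop (sep.length - 1))).2)
    else ((c :: (sp sep t).1), (sp sep t).2)
termination_by l => l.length
decreasing_by
  · simp only [List.length_drop, List.length_cons]; omega
  · simp

theorem rep_go_eq (old new : List Char) (hold : old ≠ []) :
    ∀ (fuel : Nat) (l acc : List Char), l.length ≤ fuel →
      PySem.Chars.replace.go old new fuel l acc = acc.reverse ++ rep old new l := by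
  intro fuel
  induction fuel with
  | zero =>
    intro l acc h
    have hl : l = [] := List.eq_nil_of_length_eq_zero (Nat.le_zero.mp h)
    subst hl
    simp [PySem.Chars.replace.go, rep]
  | succ fuel ih =>
    intro l acc h
    cases l with
    | nil => simp [PySem.Chars.replace.go, rep]
    | cons c t =>
      rw [PySem.Chars.replace.go]
      by_cases hp : old.isPrefixOf (c :: t)
      · have h1 : 1 ≤ old.length := by
          cases old with
          | nil => exact absurd rfl hold
          | cons o os => simp
        have hdrop : (List.drop old.length (c :: t)) = t.drop (old.length - 1) := by
          obtain ⟨k, hk⟩ : ∃ k, old.length = k + 1 := ⟨old.length - 1, by omega⟩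
          simp [hk]
        rw [if_pos hp, hdrop]
        rw [ih _ _ (by simp only [List.length_drop]; simp only [List.length_cons] at h; omega)]
        rw [rep]
        rw [if_pos ⟨hp, hold⟩]
        simp
      · rw [if_neg hp]
        rw [ih _ _ (by simpa using Nat.le_of_succ_le_succ h)]
        rw [rep]
        rw [if_neg (by tauto)]
        simp

theorem replace_eq_rep (l old new : List Char) (hold : old ≠ []) :
    PySem.Chars.replace l old new = rep old new l := by
  rw [PySem.Chars.replace]
  rw [if_neg (by simpa using hold)]
  simpa using rep_go_eq old new hold l.length l [] (le_refl _)

theorem sp_go_eq (sep : List Char) (hsep : sep ≠ []) :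
    ∀ (fuel : Nat) (l cur : List Char) (acc : List (List Char)), l.length ≤ fuel →
      PySem.Chars.splitOn.go sep fuel l cur acc
        = acc.reverse ++ ((cur.reverse ++ (sp sep l).1) :: (sp sep l).2) := by
  intro fuel
  induction fuel with
  | zero =>
    intro l cur acc h
    have hl : l = [] := List.eq_nil_of_length_eq_zero (Nat.le_zero.mp h)
    subst hl
    simp [PySem.Chars.splitOn.go, sp]
  | succ fuel ih =>
    intro l cur acc h
    cases l with
    | nil => simp [PySem.Chars.splitOn.go, sp]
    | cons c t =>
      rw [PySem.Chars.splitOn.go]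
      by_cases hp : sep.isPrefixOf (c :: t)
      · have h1 : 1 ≤ sep.length := by
          cases sep with
          | nil => exact absurd rfl hsep
          | cons o os => simp
        have hdrop : (List.drop sep.length (c :: t)) = t.drop (sep.length - 1) := by
          obtain ⟨k, hk⟩ : ∃ k, sep.length = k + 1 := ⟨sep.length - 1, by omega⟩
          simp [hk]
        rw [if_pos hp, hdrop]
        rw [ih _ _ _ (by simp only [List.length_drop]; simp only [List.length_cons] at h; omega)]
        rw [sp]
        rw [if_pos ⟨hp, hsep⟩]
        simp
      · rw [if_neg hp]
        rw [ih _ _ _ (by simpa using Nat.le_of_succ_le_succ h)]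
        rw [sp]
        rw [if_neg (by tauto)]
        simp

theorem splitOn_eq_sp (l sep : List Char) (hsep : sep ≠ []) :
    PySem.Chars.splitOn l sep = (sp sep l).1 :: (sp sep l).2 := by
  rw [PySem.Chars.splitOn]
  rw [sp_go_eq sep hsep (l.length + 1) l [] [] (by omega)]
  simp

-- a join whose head piece starts with c starts with c
theorem join_cons_out (sep : List Char) (c : Char) (q : List Char) (qs : List (List Char)) :
    PySem.Chars.join sep ((c :: q) :: qs) = c :: PySem.Chars.join sep (q :: qs) := by
  cases qs with
  | nil => simp [PySem.Chars.join_singleton]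
  | cons q' t => rw [PySem.Chars.join_cons_cons, PySem.Chars.join_cons_cons]; simp

-- split/join roundtrip: sep.join(l.split(sep)) = l
theorem join_sp (sep : List Char) (hsep : sep ≠ []) :
    ∀ l : List Char, PySem.Chars.join sep ((sp sep l).1 :: (sp sep l).2) = l
  | [] => by simp [sp, PySem.Chars.join_singleton]
  | c :: t => by
    by_cases hp : sep.isPrefixOf (c :: t)
    · have hpre : sep <+: (c :: t) := List.isPrefixOf_iff_prefix.mp hp
      have h1 : 1 ≤ sep.length := by
        cases sep with
        | nil => exact absurd rfl hsep
        | cons o os => simp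
      rw [sp, if_pos ⟨hp, hsep⟩]
      rw [PySem.Chars.join_cons_cons]
      rw [join_sp sep hsep (t.drop (sep.length - 1))]
      have hdrop : t.drop (sep.length - 1) = List.drop sep.length (c :: t) := by
        obtain ⟨k, hk⟩ : ∃ k, sep.length = k + 1 := ⟨sep.length - 1, by omega⟩
        simp [hk]
      rw [hdrop]
      have htake : sep = List.take sep.length (c :: t) := by
        rw [List.prefix_iff_eq_take] at hpre; exact hpre
      conv_rhs => rw [← List.take_append_drop sep.length (c :: t)]
      rw [← htake]
      simp
    · rw [sp, if_neg (by tauto)]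
      rw [join_cons_out]
      rw [join_sp sep hsep t]
termination_by l => l.length
decreasing_by
  · simp only [List.length_drop, List.length_cons]; omega
  · simp

-- deleting a single character is a filter
theorem rep_single (d : Char) : ∀ l : List Char, rep [d] [] l = l.filter (· != d)
  | [] => by simp [rep]
  | c :: t => by
    rw [rep]
    by_cases hdc : d = c
    · subst hdc
      rw [if_pos ⟨by simp [List.isPrefixOf], by simp⟩]
      simp [rep_single d t]
    · rw [if_neg (fun h => hdc (by simpa [List.isPrefixOf] using h.1))]
      have hcd : (c != d) = true := bne_iff_ne.mpr (fun h => hdc h.symm)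
      simp [rep_single d t, hcd]

-- a filter distributes through a join
theorem filter_join (p : Char → Bool) (sep : List Char) :
    ∀ qs : List (List Char), (PySem.Chars.join sep qs).filter p
      = PySem.Chars.join (sep.filter p) (qs.map (List.filter p))
  | [] => by simp [PySem.Chars.join_nil]
  | [q] => by simp [PySem.Chars.join_singleton]
  | q :: q' :: t => by
    rw [PySem.Chars.join_cons_cons]
    simp only [List.map_cons]
    rw [PySem.Chars.join_cons_cons]
    rw [List.filter_append, List.filter_append]
    rw [← List.map_cons]
    rw [filter_join p sep (q' :: t)]

-- no occurrence of P can cross a boundary whose next character is a ',' that P does not contain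
theorem rep_append_comma (P nw : List Char) (hP : P ≠ []) (hc : ',' ∉ P) :
    ∀ u v : List Char, rep P nw (u ++ ',' :: v) = rep P nw u ++ rep P nw (',' :: v)
  | [], v => by simp [rep]
  | c :: t, v => by
    by_cases hp : P.isPrefixOf (c :: t ++ ',' :: v)
    · have hpre : P <+: (c :: t ++ ',' :: v) := List.isPrefixOf_iff_prefix.mp hp
      have hlen : P.length ≤ t.length + 1 := by
        by_contra hlt
        have h1 : t.length + 1 < P.length := by omega
        have hidx : (t.length + 1) < (c :: t ++ ',' :: v).length := by
          simp only [List.cons_append, List.length_cons, List.length_append]; omega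
        have he : P[t.length + 1]'h1 = (c :: t ++ ',' :: v)[t.length + 1]'hidx :=
          hpre.getElem h1
        have he2 : (c :: t ++ ',' :: v)[t.length + 1]'hidx = ',' := by
          rw [List.getElem_append_right (by simp)]
          simp
        exact hc (by rw [← he2, ← he]; exact List.getElem_mem h1)
      have hpre2 : P <+: (c :: t) := by
        have h0 : P = List.take P.length ((c :: t) ++ ',' :: v) := List.prefix_iff_eq_take.mp hpre
        rw [List.take_append_of_le_length (by simpa using hlen)] at h0
        exact List.prefix_iff_eq_take.mpr h0
      have hp2 : P.isPrefixOf (c :: t) := List.isPrefixOf_iff_prefix.mpr hpre2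
      have h1 : 1 ≤ P.length := by
        cases P with
        | nil => exact absurd rfl hP
        | cons o os => simp
      rw [show (c :: t ++ ',' :: v) = c :: (t ++ ',' :: v) by simp] at hp ⊢
      rw [rep, if_pos ⟨hp, hP⟩]
      conv_rhs => rw [rep, if_pos ⟨hp2, hP⟩]
      have hd : (t ++ ',' :: v).drop (P.length - 1) = t.drop (P.length - 1) ++ ',' :: v :=
        List.drop_append_of_le_length (by omega)
      rw [hd, rep_append_comma P nw hP hc (t.drop (P.length - 1)) v, List.append_assoc]
    · have hp2 : ¬ P.isPrefixOf (c :: t) := by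
        intro h
        exact hp (List.isPrefixOf_iff_prefix.mpr
          ((List.isPrefixOf_iff_prefix.mp h).trans (List.prefix_append _ _)))
      rw [show (c :: t ++ ',' :: v) = c :: (t ++ ',' :: v) by simp] at hp ⊢
      rw [rep, if_neg (by tauto)]
      conv_rhs => rw [rep, if_neg (by tauto)]
      rw [rep_append_comma P nw hP hc t v]
      simp
termination_by u _ => u.length
decreasing_by
  · simp only [List.length_drop, List.length_cons]; omega
  · simp

-- "label: " matches at neither of the two separator positions
theorem rep_label_sep (nw : List Char) (v : List Char) :
    rep ['l','a','b','e','l',':',' '] nw (',' :: ' ' :: v)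
      = ',' :: ' ' :: rep ['l','a','b','e','l',':',' '] nw v := by
  rw [rep, if_neg (by simp [List.isPrefixOf])]
  rw [rep, if_neg (by simp [List.isPrefixOf])]

-- removing "label: " distributes through a ", " join
theorem rep_label_join :
    ∀ qs : List (List Char), rep ['l','a','b','e','l',':',' '] [] (PySem.Chars.join [',',' '] qs)
      = PySem.Chars.join [',',' '] (qs.map (rep ['l','a','b','e','l',':',' '] []))
  | [] => by simp [PySem.Chars.join_nil, rep]
  | [q] => by simp [PySem.Chars.join_singleton]
  | q :: q' :: t => by
    rw [PySem.Chars.join_cons_cons]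
    simp only [List.map_cons]
    rw [PySem.Chars.join_cons_cons]
    rw [show (q ++ [',',' '] ++ PySem.Chars.join [',',' '] (q' :: t))
          = q ++ ',' :: ' ' :: PySem.Chars.join [',',' '] (q' :: t) by simp]
    rw [rep_append_comma _ _ (by decide) (by decide) q (' ' :: PySem.Chars.join [',',' '] (q' :: t))]
    rw [rep_label_sep]
    rw [← List.map_cons]
    rw [rep_label_join (q' :: t)]
    simp

-- the whole claim at the List Char level
theorem main_chars (s : List Char) :
    PySem.Chars.join [',',' ']
      ((PySem.Chars.splitOn s ['}',',',' ','{']).map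
        (fun p => rep ['l','a','b','e','l',':',' '] []
          (((p.filter (· != '{')).filter (· != '}')).filter (· != '\''))))
      = rep ['l','a','b','e','l',':',' '] []
          (((s.filter (· != '{')).filter (· != '}')).filter (· != '\'')) := by
  have hD : (['}',',',' ','{'] : List Char) ≠ [] := by decide
  rw [splitOn_eq_sp s _ hD]
  conv_rhs => rw [← join_sp _ hD s]
  rw [filter_join, filter_join, filter_join]
  rw [show ((((['}',',',' ','{'] : List Char).filter (· != '{')).filter (· != '}')).filter (· != '\''))
        = [',',' '] by decide]
  rw [rep_label_join]
  simp [List.map_map, Function.comp_def, List.filter_filter]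

-- ===== VERDICT (by name: the statement is the Claim_ definition above) =====
theorem drivers_cleaner_py_spec : Claim_equal_drivers_cleaner_py := by
  intro drivers _
  unfold Spec_drivers_cleaner_py drivers_cleaner_py drivers_cleaner_py_alt
  have hinj : ∀ (x y : String), x.toList = y.toList → x = y := by
    intro x y h
    rw [← String.ofList_toList (s := x), h, String.ofList_toList]
  simp only [PySem.List.foldl_append_singleton_eq_map]
  apply hinj
  rw [PySem.Str.toList_join]
  simp only [List.nil_append, List.map_map]
  simp only [PySem.Str.toList_replace, Function.comp_def]
  have t0 : "".toList = ([] : List Char) := by decide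
  have t1 : "{".toList = ['{'] := by decide
  have t2 : "}".toList = ['}'] := by decide
  have t3 : "'".toList = ['\''] := by decide
  have t4 : "label: ".toList = ['l','a','b','e','l',':',' '] := by decide
  have t5 : ", ".toList = [',',' '] := by decide
  have t6 : "}, {".toList = ['}',',',' ','{'] := by decide
  simp only [t0, t1, t2, t3, t4, t5]
  have e : ∀ (old nw : List Char), old ≠ [] → ∀ x, PySem.Chars.replace x old nw = rep old nw x :=
    fun old nw h x => replace_eq_rep x old nw h
  simp only [e ['{'] [] (by decide), e ['}'] [] (by decide), e ['\''] [] (by decide),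
    e ['l','a','b','e','l',':',' '] [] (by decide)]
  simp only [rep_single]
  have hparts : ((PySem.Str.split? drivers "}, {").getD []).map String.toList
      = PySem.Chars.splitOn drivers.toList ['}',',',' ','{'] := by
    rw [PySem.Str.split?, PySem.Chars.split?, if_neg (by decide), t6]
    simp [List.map_map, Function.comp_def]
  have hmap : ((PySem.Str.split? drivers "}, {").getD []).map
        (fun x => rep ['l','a','b','e','l',':',' '] []
          (((x.toList.filter (· != '{')).filter (· != '}')).filter (· != '\'')))
      = (PySem.Chars.splitOn drivers.toList ['}',',',' ','{']).map
        (fun p => rep ['l','a','b','e','l',':',' '] []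
          (((p.filter (· != '{')).filter (· != '}')).filter (· != '\''))) := by
    rw [← hparts, List.map_map]
    rfl
  rw [hmap]
  exact main_chars drivers.toList
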